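-- pv_equiv track=rewrite | github.com/tihanaujevic/algorithms_in_Bioinformatics | chapter4/BA4E.py | belongs_spectrum
-- ===== SOURCE A (Python) =====
-- def belongs_spectrum(candidate_spectrum, main_spectrum):
--     from collections import Counter
--
--     counter_c_spectrum = Counter(candidate_spectrum)
--     counter_m_spectrum = Counter(main_spectrum)
--
--     for key, count in counter_c_spectrum.items():
--         if key not in counter_m_spectrum:
--             return False
--         if count > counter_m_spectrum[key]:
--             return False
--     return True
-- ===== SOURCE B (Python) =====
-- def belongs_spectrum(candidate_spectrum, main_spectrum):
--     need = {}
--     for x in candidate_spectrum: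
--         need[x] = need.get(x, 0) + 1
--     for x in main_spectrum:
--         if need.get(x, 0) > 0:
--             need[x] -= 1
--     return all(v <= 0 for v in need.values())
-- ===== Notes on version B (the rewrite author's own statement) =====
-- stated objective: alternative
-- what changed: Instead of building two Counters and comparing counts key-by-key with early returns, B builds one requirement table from the candidate, consumes it in a single pass over the raw main list, and then checks that no positive requirement remains.
import Mathlib
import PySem

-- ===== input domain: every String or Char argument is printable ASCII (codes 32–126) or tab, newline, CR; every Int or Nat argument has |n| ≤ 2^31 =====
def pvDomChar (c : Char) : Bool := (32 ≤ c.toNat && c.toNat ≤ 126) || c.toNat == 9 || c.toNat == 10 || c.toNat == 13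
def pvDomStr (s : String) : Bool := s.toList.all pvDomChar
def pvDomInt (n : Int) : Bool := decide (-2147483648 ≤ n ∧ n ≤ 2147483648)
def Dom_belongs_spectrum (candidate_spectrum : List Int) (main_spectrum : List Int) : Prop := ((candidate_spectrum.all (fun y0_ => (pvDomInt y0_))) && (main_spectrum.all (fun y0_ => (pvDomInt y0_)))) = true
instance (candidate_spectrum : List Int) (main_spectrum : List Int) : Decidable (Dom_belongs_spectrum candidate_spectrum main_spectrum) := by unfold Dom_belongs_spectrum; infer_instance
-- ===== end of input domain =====

-- B replaces A's two-Counter key-by-key comparison by a single requirement table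
-- consumed in one pass over the raw main list; same cost, different decomposition.

-- ===== PORT A =====
-- the `for key, count in counter_c_spectrum.items()` loop with its early returns
def bsGo (items : List (Int × Int)) (cm : PySem.Dict Int Int) : Bool :=
  match items with
  | [] => true
  | (key, count) :: rest =>
    if !(cm.contains key) then false
    else if count > cm.getD key 0 then false
    else bsGo rest cm

def belongs_spectrum (candidate_spectrum : List Int) (main_spectrum : List Int) : Bool :=
  let counter_c := PySem.Dict.counter candidate_spectrum
  let counter_m := PySem.Dict.counter main_spectrum
  bsGo counter_c.items counter_m

-- ===== PORT B =====
def belongs_spectrum_alt (candidate_spectrum : List Int) (main_spectrum : List Int) : Bool :=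
  let need := candidate_spectrum.foldl
    (fun d x => d.insert x (d.getD x 0 + 1)) (PySem.Dict.empty : PySem.Dict Int Int)
  let need2 := main_spectrum.foldl
    (fun d x => if d.getD x 0 > 0 then d.modify x 0 (· - 1) else d) need
  need2.values.all (fun v => v ≤ 0)

-- ===== PRECONDITION & SPEC =====
def Spec_belongs_spectrum (candidate_spectrum : List Int) (main_spectrum : List Int) (out : Bool) : Prop := out = belongs_spectrum_alt candidate_spectrum main_spectrum
instance (candidate_spectrum : List Int) (main_spectrum : List Int) (out : Bool) : Decidable (Spec_belongs_spectrum candidate_spectrum main_spectrum out) := by unfold Spec_belongs_spectrum; infer_instance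

-- ===== CLAIM (what is proved, stated in full; the proofs are below) =====
def Claim_equal_belongs_spectrum : Prop := ∀ (candidate_spectrum : List Int) (main_spectrum : List Int), Dom_belongs_spectrum candidate_spectrum main_spectrum → Spec_belongs_spectrum candidate_spectrum main_spectrum (belongs_spectrum candidate_spectrum main_spectrum)

-- ===== LEMMAS AND PROOFS =====

-- pointwise-on-members congruence for List.all
theorem all_congr_mem {α : Type} (l : List α) (p q : α → Bool)
    (h : ∀ x ∈ l, p x = q x) : l.all p = l.all q := by
  induction l with
  | nil => rfl
  | cons x rest ih =>
    simp only [List.all_cons]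
    rw [h x (by simp), ih (fun y hy => h y (by simp [hy]))]

-- A's loop is an `all` over the items list
theorem bsGo_eq_all (items : List (Int × Int)) (cm : PySem.Dict Int Int) :
    bsGo items cm = items.all (fun p => cm.contains p.1 && !(decide (p.2 > cm.getD p.1 0))) := by
  induction items with
  | nil => rfl
  | cons p rest ih =>
    obtain ⟨k, c⟩ := p
    simp only [bsGo, List.all_cons, ih]
    by_cases h1 : cm.contains k
    · by_cases h2 : c > cm.getD k 0 <;> simp [h1, h2]
    · simp [h1]

theorem belongs_spectrum_eq (c m : List Int) :
    belongs_spectrum c m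
      = (PySem.Set.ofList c).all (fun k => decide (c.count k ≤ m.count k)) := by
  unfold belongs_spectrum
  rw [bsGo_eq_all, PySem.Dict.items_counter, List.all_map]
  apply all_congr_mem
  intro k hk
  have hkc : k ∈ c := (PySem.Set.mem_ofList c k).mp hk
  simp only [Function.comp, PySem.Dict.getD_counter, PySem.Dict.contains_counter]
  by_cases hle : c.count k ≤ m.count k
  · have hkm : k ∈ m := by
      have h1 : 1 ≤ c.count k := List.one_le_count_iff.mpr hkc
      have : 0 < m.count k := by omega
      exact List.count_pos_iff.mp this
    have hnlt : ¬ m.count k < c.count k := by omega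
    simp [hkm, hnlt, hle]
  · have hlt : m.count k < c.count k := by omega
    simp [hlt, hle]

-- the decrement loop preserves keys
theorem decLoop_keys (m : List Int) (d : PySem.Dict Int Int) :
    (m.foldl (fun d x => if d.getD x 0 > 0 then d.modify x 0 (· - 1) else d) d).keys = d.keys := by
  induction m generalizing d with
  | nil => rfl
  | cons x rest ih =>
    simp only [List.foldl_cons]
    by_cases h : d.getD x 0 > 0
    · have hx : d.contains x = true := by
        cases hcc : d.contains x
        · have := PySem.Dict.getD_of_not_contains d (0 : Int) hcc
          omega
        · rfl
      rw [if_pos h, ih, PySem.Dict.keys_modify,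
        PySem.Dict.keys_insert_of_contains _ _ hx]
    · rw [if_neg h, ih]

-- value of the decrement loop at any key
theorem decLoop_getD (m : List Int) (d : PySem.Dict Int Int) (k : Int)
    (hnn : 0 ≤ d.getD k 0) :
    (m.foldl (fun d x => if d.getD x 0 > 0 then d.modify x 0 (· - 1) else d) d).getD k 0
      = max (d.getD k 0 - m.count k) 0 := by
  induction m generalizing d with
  | nil => simp; omega
  | cons x rest ih =>
    simp only [List.foldl_cons]
    by_cases h : d.getD x 0 > 0
    · rw [if_pos h]
      have hmod : 0 ≤ (d.modify x 0 (· - 1)).getD k 0 := by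
        rw [PySem.Dict.getD_modify]
        by_cases hkx : k = x
        · subst hkx; rw [if_pos rfl]; omega
        · rw [if_neg hkx]; omega
      rw [ih _ hmod, PySem.Dict.getD_modify]
      by_cases hkx : k = x
      · subst hkx
        rw [if_pos rfl, List.count_cons_self]
        push_cast; omega
      · rw [if_neg hkx, List.count_cons_of_ne (Ne.symm hkx)]
    · rw [if_neg h, ih _ hnn]
      by_cases hkx : k = x
      · subst hkx
        rw [List.count_cons_self]
        push_cast; omega
      · rw [List.count_cons_of_ne (Ne.symm hkx)]

theorem belongs_spectrum_alt_eq (c m : List Int) :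
    belongs_spectrum_alt c m
      = (PySem.Set.ofList c).all (fun k => decide (c.count k ≤ m.count k)) := by
  simp only [belongs_spectrum_alt]
  set need := c.foldl (fun (d : PySem.Dict Int Int) x => d.insert x (d.getD x 0 + 1))
    PySem.Dict.empty with hneed
  have hkeys0 : need.keys = PySem.Set.ofList c := by
    rw [hneed, PySem.Dict.keys_foldl_insert, PySem.Dict.keys_empty,
      PySem.Set.update_nil_left]
  have hgetD : ∀ k, need.getD k 0 = (c.count k : Int) := by
    intro k
    rw [hneed, PySem.Dict.getD_foldl_insert_add_one, PySem.Dict.getD_empty]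
    ring
  have hkeys : (m.foldl (fun d x => if d.getD x 0 > 0 then d.modify x 0 (· - 1) else d)
      need).keys = PySem.Set.ofList c := by
    rw [decLoop_keys, hkeys0]
  have hnd : (m.foldl (fun d x => if d.getD x 0 > 0 then d.modify x 0 (· - 1) else d)
      need).keys.Nodup := by
    rw [hkeys]; exact PySem.Set.nodup_ofList c
  rw [PySem.Dict.values_eq_map_keys _ hnd (0 : Int), hkeys, List.all_map]
  apply all_congr_mem
  intro k hk
  have hval : (m.foldl (fun d x => if d.getD x 0 > 0 then d.modify x 0 (· - 1) else d)
      need).getD k 0 = max ((c.count k : Int) - m.count k) 0 := by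
    rw [decLoop_getD m need k (by rw [hgetD]; positivity), hgetD]
  simp only [Function.comp, hval]
  by_cases hle : (c.count k : Int) ≤ (m.count k : Int)
  · simp [hle]; omega
  · simp [hle]; omega

-- ===== VERDICT (by name: the statement is the Claim_ definition above) =====
theorem belongs_spectrum_spec : Claim_equal_belongs_spectrum := by
  intro c m _
  unfold Spec_belongs_spectrum
  rw [belongs_spectrum_eq, belongs_spectrum_alt_eq]
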